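-- pv_equiv track=rewrite | github.com/Mattie/chatsnack | chatsnack/yamlformat.py | _should_collapse_to_scalar
-- ===== SOURCE A (Python) =====
-- def _should_collapse_to_scalar(content_dict, fidelity):
--     """Return True if an expanded block can collapse back to scalar form."""
--     for key in content_dict:
--         if key == "text":
--             continue
--         if key == "provider_extras":
--             if fidelity in ("continuation", "diagnostic"):
--                 return False
--             continue
--         if key == "encrypted_content":
--             if fidelity != "authoring":
--                 return False
--             continue
--         return False
--     return True
-- ===== SOURCE B (Python) =====
-- _ALLOWED = {"text", "provider_extras", "encrypted_content"}
--
--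
-- def _should_collapse_to_scalar(content_dict, fidelity):
--     """Return True if an expanded block can collapse back to scalar form."""
--     keys = set(content_dict)
--     if not keys <= _ALLOWED:
--         return False
--     if "provider_extras" in keys and fidelity in ("continuation", "diagnostic"):
--         return False
--     if "encrypted_content" in keys and fidelity != "authoring":
--         return False
--     return True
-- ===== Notes on version B (the rewrite author's own statement) =====
-- stated objective: idiomatic
-- what changed: Replaced the ordered per-key loop with early returns by a whole-keyset subset test against the allowed set plus two independent membership guards for provider_extras and encrypted_content.
import Mathlib
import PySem

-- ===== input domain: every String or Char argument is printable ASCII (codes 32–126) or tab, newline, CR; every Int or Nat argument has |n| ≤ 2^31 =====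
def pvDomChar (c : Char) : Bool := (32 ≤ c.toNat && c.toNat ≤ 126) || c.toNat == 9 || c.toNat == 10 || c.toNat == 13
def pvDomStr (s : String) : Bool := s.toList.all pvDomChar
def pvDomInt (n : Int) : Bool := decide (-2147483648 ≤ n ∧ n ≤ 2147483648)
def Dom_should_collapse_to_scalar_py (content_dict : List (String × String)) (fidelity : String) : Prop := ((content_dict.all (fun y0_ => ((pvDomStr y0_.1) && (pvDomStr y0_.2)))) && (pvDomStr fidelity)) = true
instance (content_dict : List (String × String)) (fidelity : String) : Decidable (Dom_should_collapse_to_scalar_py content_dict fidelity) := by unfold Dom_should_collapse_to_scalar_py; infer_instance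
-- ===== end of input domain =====

-- B replaces A's ordered per-key loop by a keyset-subset test plus two membership guards (idiomatic; return value only, same results).
-- ===== PORT A =====
def should_collapse_to_scalar_py (content_dict : List (String × String)) (fidelity : String) : Bool :=
  match content_dict with
  | [] => true
  | (key, _) :: rest =>
    if key = "text" then should_collapse_to_scalar_py rest fidelity
    else if key = "provider_extras" then
      if fidelity = "continuation" || fidelity = "diagnostic" then false
      else should_collapse_to_scalar_py rest fidelity
    else if key = "encrypted_content" then
      if fidelity ≠ "authoring" then false
      else should_collapse_to_scalar_py rest fidelity
    else false

-- ===== PORT B =====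
-- B: subset check of the key set against the allowed keys, then two membership guards.
def should_collapse_to_scalar_py_alt (content_dict : List (String × String)) (fidelity : String) : Bool :=
  let keys := PySem.Set.ofList (content_dict.map Prod.fst)
  if ¬ (PySem.Set.issubset keys ["text", "provider_extras", "encrypted_content"]) then false
  else if keys.contains "provider_extras" && (fidelity = "continuation" || fidelity = "diagnostic") then false
  else if keys.contains "encrypted_content" && fidelity ≠ "authoring" then false
  else true

-- ===== PRECONDITION & SPEC =====
def Spec_should_collapse_to_scalar_py (content_dict : List (String × String)) (fidelity : String) (out : Bool) : Prop := out = should_collapse_to_scalar_py_alt content_dict fidelity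
instance (content_dict : List (String × String)) (fidelity : String) (out : Bool) : Decidable (Spec_should_collapse_to_scalar_py content_dict fidelity out) := by unfold Spec_should_collapse_to_scalar_py; infer_instance

-- ===== CLAIM (what is proved, stated in full; the proofs are below) =====
def Claim_equal_should_collapse_to_scalar_py : Prop := ∀ (content_dict : List (String × String)) (fidelity : String), Dom_should_collapse_to_scalar_py content_dict fidelity → Spec_should_collapse_to_scalar_py content_dict fidelity (should_collapse_to_scalar_py content_dict fidelity)

-- ===== LEMMAS AND PROOFS =====

-- A characterisation of both sides via List.all over the keys, once fidelity's guards are case-split.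
-- a key passes A's per-key checks
def goodKey (f k : String) : Bool :=
  k = "text"
  || (k = "provider_extras" && !(f = "continuation" || f = "diagnostic"))
  || (k = "encrypted_content" && !(f ≠ "authoring" : Bool))

theorem A_eq_all (cd : List (String × String)) (f : String) :
    should_collapse_to_scalar_py cd f = (cd.map Prod.fst).all (goodKey f) := by
  induction cd with
  | nil => rfl
  | cons p rest ih =>
    obtain ⟨k, v⟩ := p
    simp only [should_collapse_to_scalar_py, List.map_cons, List.all_cons]
    by_cases h1 : k = "text"
    · simp [h1, goodKey, ih]
    · by_cases h2 : k = "provider_extras"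
      · by_cases h3 : f = "continuation" ∨ f = "diagnostic"
        · rcases h3 with h3 | h3 <;> simp [h1, h2, h3, goodKey, ih]
        · push_neg at h3
          simp [h1, h2, h3.1, h3.2, goodKey, ih, List.all_map, Function.comp]
      · by_cases h4 : k = "encrypted_content"
        · by_cases h5 : f = "authoring"
          · subst h5
            simp [h1, h2, h4, goodKey, ih, List.all_map, Function.comp]
          · simp [h1, h2, h4, h5, goodKey, ih]
        · simp [h1, h2, h4, goodKey, ih]

theorem alt_eq_all (cd : List (String × String)) (f : String) :
    should_collapse_to_scalar_py_alt cd f = (cd.map Prod.fst).all (goodKey f) := by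
  simp only [should_collapse_to_scalar_py_alt]
  have hmem : ∀ k : String, (k ∈ PySem.Set.ofList (cd.map Prod.fst)) ↔ k ∈ cd.map Prod.fst :=
    fun k => PySem.Set.mem_ofList _ _
  rcases h : (cd.map Prod.fst).all (goodKey f) with _ | _
  · -- some key fails
    simp only [List.all_eq_false] at h
    obtain ⟨k, hk, hbad⟩ := h
    simp only [goodKey, Bool.or_eq_false_iff, Bool.and_eq_false_iff, decide_eq_false_iff_not,
      Bool.not_eq_false', Bool.not_eq_true, decide_eq_true_eq] at hbad
    split_ifs with h1 h2 h3
    · rfl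
    · rfl
    · exfalso
      have hk' := (PySem.Set.issubset_iff _ _).mp h1 k ((hmem k).2 hk)
      simp only [List.mem_cons, List.not_mem_nil, or_false] at hk'
      obtain ⟨⟨hnt, hpe⟩, hec⟩ := hbad
      rcases hk' with rfl | rfl | rfl
      · exact hnt rfl
      · have hc : PySem.Set.contains (PySem.Set.ofList (cd.map Prod.fst)) "provider_extras" = true :=
          (PySem.Set.contains_iff _ _).mpr ((hmem _).2 hk)
        rcases hpe with hx | hx
        · exact hx rfl
        · rw [hc, hx] at h2
          exact h2 rfl
      · have hc : PySem.Set.contains (PySem.Set.ofList (cd.map Prod.fst)) "encrypted_content" = true :=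
          (PySem.Set.contains_iff _ _).mpr ((hmem _).2 hk)
        rcases hec with hx | hx
        · exact hx rfl
        · rw [hc, decide_eq_true hx] at h3
          exact h3 rfl
    · rfl
  · -- all keys pass
    simp only [List.all_eq_true] at h
    have hsub : PySem.Set.issubset (PySem.Set.ofList (cd.map Prod.fst))
        ["text", "provider_extras", "encrypted_content"] = true := by
      rw [PySem.Set.issubset_iff _ _]
      intro k hk
      have := h k ((hmem k).1 hk)
      simp only [goodKey, Bool.or_eq_true, Bool.and_eq_true, decide_eq_true_eq] at this
      simp only [List.mem_cons, List.not_mem_nil, or_false]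
      tauto
    have hpe : PySem.Set.contains (PySem.Set.ofList (cd.map Prod.fst)) "provider_extras" = true →
        (f = "continuation" ∨ f = "diagnostic") → False := by
      intro hc hf
      rw [PySem.Set.contains_iff _ _] at hc
      have := h _ ((hmem _).1 hc)
      simp only [goodKey, Bool.or_eq_true, Bool.and_eq_true, decide_eq_true_eq,
        Bool.not_eq_true', Bool.or_eq_false_iff, decide_eq_false_iff_not] at this
      tauto
    have hec : PySem.Set.contains (PySem.Set.ofList (cd.map Prod.fst)) "encrypted_content" = true →
        f = "authoring" := by
      intro hc
      rw [PySem.Set.contains_iff _ _] at hc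
      have := h _ ((hmem _).1 hc)
      simp only [goodKey, Bool.or_eq_true, Bool.and_eq_true, decide_eq_true_eq,
        Bool.not_eq_true', decide_eq_false_iff_not, Decidable.not_not] at this
      tauto
    split_ifs with h1 h2
    · exfalso
      rw [Bool.and_eq_true] at h1
      obtain ⟨hc, hf⟩ := h1
      simp only [Bool.or_eq_true, decide_eq_true_eq] at hf
      exact hpe hc hf
    · exfalso
      rw [Bool.and_eq_true] at h2
      obtain ⟨hc, hf⟩ := h2
      simp only [decide_eq_true_eq] at hf
      exact hf (hec hc)
    · rfl

theorem altB_eq (cd : List (String × String)) (f : String) :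
    should_collapse_to_scalar_py_alt cd f = should_collapse_to_scalar_py cd f := by
  rw [A_eq_all, alt_eq_all]


-- ===== VERDICT (by name: the statement is the Claim_ definition above) =====
theorem should_collapse_to_scalar_py_spec : Claim_equal_should_collapse_to_scalar_py := by
  intro cd f _
  unfold Spec_should_collapse_to_scalar_py
  exact (altB_eq cd f).symm
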